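-- pv_equiv track=rewrite | github.com/ssahn0806/oj_practice | programmers/LV2/eat_the_ground.py | solution
-- ===== SOURCE A (Python) =====
-- def solution(land):
--
--     N = len(land)
--
--     dp_table = [
--         [0 for _ in range(4)]
--         for _ in range(N)
--     ]
--
--     # dp_table[i][j] : (i행에서 j열을 선택했을 때까지 얻은 최대 점수)
--
--     for i in range(4):
--         dp_table[0][i] = land[0][i]
--
--     for i in range(1,N):
--         for j in range(4):
--             prev_max = max([dp_table[i-1][k] for k in range(4) if k!=j])
--             dp_table[i][j] = prev_max + land[i][j]
--
--     return max(dp_table[N-1])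
-- ===== SOURCE B (Python) =====
-- def solution(land):
--     prev = list(land[0][:4])
--     for row in land[1:]:
--         # top-two of prev with multiplicity, and index of the first maximum
--         b1, i1, b2 = prev[0], 0, None
--         for idx in range(1, 4):
--             v = prev[idx]
--             if v > b1:
--                 b2, b1, i1 = b1, v, idx
--             elif b2 is None or v > b2:
--                 b2 = v
--         prev = [(b2 if j == i1 else b1) + row[j] for j in range(4)]
--     return max(prev)
-- ===== Notes on version B (the rewrite author's own statement) =====
-- stated objective: alternative
-- what changed: Instead of rebuilding and rescanning a 3-element candidate list for every column of every row (plus a full N x 4 dp table), B makes one top-two-with-multiplicity scan of the previous dp row and keeps only a rolling 4-value row, picking the second-best value exactly at the argmax column.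
import Mathlib
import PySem

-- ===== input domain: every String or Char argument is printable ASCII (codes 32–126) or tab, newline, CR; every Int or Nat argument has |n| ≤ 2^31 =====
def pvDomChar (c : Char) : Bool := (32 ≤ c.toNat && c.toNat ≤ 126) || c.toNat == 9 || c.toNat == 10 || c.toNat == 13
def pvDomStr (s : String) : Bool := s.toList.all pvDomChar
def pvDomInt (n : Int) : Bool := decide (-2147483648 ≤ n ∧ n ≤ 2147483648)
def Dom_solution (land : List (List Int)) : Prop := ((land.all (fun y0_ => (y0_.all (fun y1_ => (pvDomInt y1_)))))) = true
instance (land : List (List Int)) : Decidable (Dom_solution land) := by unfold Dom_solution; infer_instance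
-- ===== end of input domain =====

-- B replaces A's inner 3-element rescan per column by a single top-two (with
-- multiplicity) scan of the previous dp row; same return value on Pre_.

-- ===== PORT A =====
-- inner loop of A: new dp row from the previous dp row and the land row
def aStep (prev row : List Int) : List Int :=
  (PySem.List.pyRange 0 4 1).map (fun j =>
    (PySem.List.max? (((PySem.List.pyRange 0 4 1).filter (fun k => k ≠ j)).map
        (fun k => PySem.List.pyGetD prev k 0)) (fun x => x)).getD 0
      + PySem.List.pyGetD row j 0)

def solution (land : List (List Int)) : Int :=
  let N : Int := (land.length : Int)
  let dp0 := (PySem.List.pyRange 0 4 1).map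
    (fun i => PySem.List.pyGetD (PySem.List.pyGetD land 0 []) i 0)
  let last := (PySem.List.pyRange 1 N 1).foldl
    (fun prev i => aStep prev (PySem.List.pyGetD land i [])) dp0
  (PySem.List.max? last (fun x => x)).getD 0

-- ===== PORT B =====
-- loop body of B's top-two scan (b1 = best, i1 = its first index, b2 = second best)
def bTopStep (prev : List Int) (st : Int × Int × Option Int) (idx : Int) :
    Int × Int × Option Int :=
  let v := PySem.List.pyGetD prev idx 0
  if v > st.1 then (v, idx, some st.1)
  else match st.2.2 with
    | none => (st.1, st.2.1, some v)
    | some b => if v > b then (st.1, st.2.1, some v) else st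

def bTop (prev : List Int) : Int × Int × Option Int :=
  (PySem.List.pyRange 1 4 1).foldl (bTopStep prev) (PySem.List.pyGetD prev 0 0, 0, none)

def bStep (prev row : List Int) : List Int :=
  let t := bTop prev
  (PySem.List.pyRange 0 4 1).map (fun j =>
    (if j = t.2.1 then t.2.2.getD 0 else t.1) + PySem.List.pyGetD row j 0)

def solution_alt (land : List (List Int)) : Int :=
  let prev0 := PySem.List.slice (PySem.List.pyGetD land 0 []) none (some 4)
  let last := (PySem.List.slice land (some 1) none).foldl bStep prev0
  (PySem.List.max? last (fun x => x)).getD 0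

-- ===== PRECONDITION & SPEC =====
-- A raises IndexError on an empty land or on any row with fewer than 4 entries.
def Pre_solution (land : List (List Int)) : Prop :=
  land ≠ [] ∧ ∀ row ∈ land, 4 ≤ row.length
instance (land : List (List Int)) : Decidable (Pre_solution land) := by
  unfold Pre_solution; infer_instance
def pvWitness_solution : List (List Int) := [[1, 2, 3, 4], [4, 3, 2, 1]]

def Spec_solution (land : List (List Int)) (out : Int) : Prop := out = solution_alt land
instance (land : List (List Int)) (out : Int) : Decidable (Spec_solution land out) := by unfold Spec_solution; infer_instance

-- ===== CLAIM (what is proved, stated in full; the proofs are below) =====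
def Claim_equal_solution : Prop := ∀ (land : List (List Int)), Dom_solution land → Pre_solution land → Spec_solution land (solution land)

-- ===== LEMMAS AND PROOFS =====

theorem bTopStep_eval (prev : List Int) (st : Int × Int × Option Int) (idx v : Int)
    (hv : PySem.List.pyGetD prev idx 0 = v) :
    bTopStep prev st idx =
      if v > st.1 then (v, idx, some st.1)
      else match st.2.2 with
        | none => (st.1, st.2.1, some v)
        | some s => if v > s then (st.1, st.2.1, some v) else st := by
  subst hv; rfl

theorem g0 (a b c d : Int) : PySem.List.pyGetD [a, b, c, d] (0 : Int) 0 = a :=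
  PySem.List.pyGetD_ofNat' _ 0 _
theorem g1 (a b c d : Int) : PySem.List.pyGetD [a, b, c, d] (1 : Int) 0 = b :=
  PySem.List.pyGetD_ofNat' _ 1 _
theorem g2 (a b c d : Int) : PySem.List.pyGetD [a, b, c, d] (2 : Int) 0 = c :=
  PySem.List.pyGetD_ofNat' _ 2 _
theorem g3 (a b c d : Int) : PySem.List.pyGetD [a, b, c, d] (3 : Int) 0 = d :=
  PySem.List.pyGetD_ofNat' _ 3 _

-- explicit decision tree of B's top-two scan on a length-4 previous row
theorem bTop_abcd (a b c d : Int) :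
    bTop [a, b, c, d] =
      if a < b then
        (if b < c then
          (if c < d then (d, 3, some c) else (c, 2, some (max b d)))
        else
          (if b < d then (d, 3, some b) else (b, 1, some (max (max a c) d))))
      else
        (if a < c then
          (if c < d then (d, 3, some c) else (c, 2, some (max a d)))
        else
          (if a < d then (d, 3, some a) else (a, 0, some (max (max b c) d)))) := by
  have h3 : PySem.List.pyRange 1 4 1 = [1, 2, 3] := by decide
  simp only [bTop, h3, List.foldl, g0]
  rw [bTopStep_eval [a, b, c, d] _ 1 b (g1 a b c d)]
  split_ifs with h1 <;>
    · rw [bTopStep_eval [a, b, c, d] _ 2 c (g2 a b c d)]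
      simp only []
      split_ifs <;>
        · rw [bTopStep_eval [a, b, c, d] _ 3 d (g3 a b c d)]
          simp only [max_def]
          split_ifs <;> simp_all <;> omega

theorem m3 (x y z : Int) :
    (PySem.List.max? [x, y, z] (fun t => t)).getD 0 = max (max x y) z := by
  rw [PySem.List.max?_id_cons]; simp [List.foldl]

-- the two row transitions agree on length-4 previous rows
set_option maxHeartbeats 1000000 in
theorem step_eq (a b c d : Int) (row : List Int) :
    aStep [a, b, c, d] row = bStep [a, b, c, d] row := by
  have h4 : PySem.List.pyRange 0 4 1 = [0, 1, 2, 3] := by decide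
  simp only [aStep, bStep, bTop_abcd, h4, List.map]
  norm_num [List.filter, g0, g1, g2, g3, m3]
  refine ⟨?_, ?_, ?_, ?_⟩ <;>
    · simp only [max_def]
      split_ifs <;> dsimp only [Option.getD] at * <;> omega

theorem step_len (prev row : List Int) : (bStep prev row).length = 4 := by
  simp [bStep, PySem.List.length_pyRange_one]

theorem fold_eq (rest : List (List Int)) (prev : List Int) (h : prev.length = 4) :
    rest.foldl aStep prev = rest.foldl bStep prev := by
  induction rest generalizing prev with
  | nil => rfl
  | cons r t ih =>
    obtain ⟨a, b, c, d, hpe⟩ : ∃ a b c d, prev = [a, b, c, d] := by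
      match prev, h with
      | [a, b, c, d], _ => exact ⟨a, b, c, d, rfl⟩
    subst hpe
    simp only [List.foldl, step_eq]
    exact ih _ (step_len _ _)

-- A's indexed fold over range(1, N) is the fold over land[1:]
theorem foldl_idx (g : List Int → List Int → List Int) (x : List Int)
    (l : List (List Int)) (s : List Int) :
    (PySem.List.pyRange 1 (1 + (l.length : Int)) 1).foldl
      (fun p i => g p (PySem.List.pyGetD (x :: l) i [])) s
    = l.foldl g s := by
  induction l using List.reverseRecOn generalizing s with
  | nil => simp [PySem.List.pyRange_one_eq_nil]
  | append_singleton m y ih =>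
    have hr : PySem.List.pyRange 1 (1 + ((m ++ [y]).length : Int)) 1
        = PySem.List.pyRange 1 (1 + (m.length : Int)) 1 ++ [1 + (m.length : Int)] := by
      have he : (1 : Int) + ((m ++ [y]).length : Int) = (1 + (m.length : Int)) + 1 := by
        simp; omega
      rw [he, PySem.List.pyRange_one_succ_right (by omega)]
    rw [hr, List.foldl_append, List.foldl_append]
    have hmid : (PySem.List.pyRange 1 (1 + (m.length : Int)) 1).foldl
        (fun p i => g p (PySem.List.pyGetD (x :: (m ++ [y])) i [])) s
        = (PySem.List.pyRange 1 (1 + (m.length : Int)) 1).foldl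
        (fun p i => g p (PySem.List.pyGetD (x :: m) i [])) s := by
      apply PySem.List.foldl_congr_mem
      intro acc i hi
      rw [PySem.List.mem_pyRange_one] at hi
      obtain ⟨n, rfl⟩ : ∃ n : Nat, i = (n : Int) := ⟨i.toNat, by omega⟩
      rw [PySem.List.pyGetD_natCast, PySem.List.pyGetD_natCast]
      have hn : n < (x :: m).length := by simp; omega
      have hxx : x :: (m ++ [y]) = (x :: m) ++ [y] := rfl
      rw [hxx, List.getD_append _ _ _ _ hn]
    rw [hmid, ih]
    simp only [List.foldl]
    congr 1
    have hc : (1 : Int) + (m.length : Int) = (((x :: m).length : Nat) : Int) := by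
      simp <;> omega
    rw [hc, PySem.List.pyGetD_natCast]
    have hxx : x :: (m ++ [y]) = (x :: m) ++ [y] := rfl
    rw [hxx, List.getD, List.getElem?_concat_length]
    rfl

-- the initial row: A's four indexed reads of land[0] are B's land[0][:4]
theorem init_eq (a b c d : Int) (tl : List Int) :
    (PySem.List.pyRange 0 4 1).map
      (fun i => PySem.List.pyGetD (a :: b :: c :: d :: tl) i 0)
    = PySem.List.slice (a :: b :: c :: d :: tl) none (some 4) := by
  have h4 : PySem.List.pyRange 0 4 1 = [0, 1, 2, 3] := by decide
  rw [h4, PySem.List.slice_to _ (by norm_num)]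
  rw [List.map, List.map, List.map, List.map]
  rw [PySem.List.pyGetD_ofNat' _ 0, PySem.List.pyGetD_ofNat' _ 1,
      PySem.List.pyGetD_ofNat' _ 2, PySem.List.pyGetD_ofNat' _ 3]
  simp

-- ===== VERDICT (by name: the statement is the Claim_ definition above) =====
theorem solution_spec : Claim_equal_solution := by
  intro land _ hpre
  obtain ⟨hne, hrows⟩ := hpre
  obtain ⟨r0, rest, rfl⟩ : ∃ r0 rest, land = r0 :: rest := by
    cases land with
    | nil => exact absurd rfl hne
    | cons r0 rest => exact ⟨r0, rest, rfl⟩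
  have hr0 : 4 ≤ r0.length := hrows r0 List.mem_cons_self
  obtain ⟨a, b, c, d, tl, rfl⟩ : ∃ a b c d tl, r0 = a :: b :: c :: d :: tl := by
    match r0, hr0 with
    | a :: b :: c :: d :: tl, _ => exact ⟨a, b, c, d, tl, rfl⟩
  show _ = _
  unfold solution solution_alt
  simp only []
  have hN : (((a :: b :: c :: d :: tl) :: rest).length : Int) = 1 + (rest.length : Int) := by
    simp; omega
  have hget0 : PySem.List.pyGetD ((a :: b :: c :: d :: tl) :: rest) 0 []
      = a :: b :: c :: d :: tl := PySem.List.pyGetD_ofNat' _ 0 _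
  rw [hN, hget0, foldl_idx aStep, init_eq, PySem.List.slice_from_one]
  have hlen : (PySem.List.slice (a :: b :: c :: d :: tl) none (some 4)).length = 4 := by
    rw [PySem.List.slice_to _ (by norm_num)]
    simp
  rw [fold_eq rest _ hlen]
  rfl
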